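-- pv_equiv track=rewrite | github.com/MarkSon-42/CodingTest_Python | venv/명예의 전당(1).py | solution
-- ===== SOURCE A (Python) =====
-- def solution(k, score):
--     honor = []
--     answer = []
--     for i in range(len(score)):
--         if len(honor) < k:
--             honor.append(score[i])
--             answer.append(min(honor))
--             honor.sort()
--         else:
--             if score[i] >= max(honor):
--                 honor.append(score[i])
--                 honor.remove(min(honor))
--                 answer.append(min(honor))
--             elif score[i] <= min(honor):
--                 answer.append(min(honor))
--             elif min(honor) <= score[i] <= max(honor):
--                 honor.append(score[i])
--                 honor.remove(min(honor))
--                 answer.append(min(honor))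
--
--     return answer
-- ===== SOURCE B (Python) =====
-- def _siftup(h, i):
--     # bubble h[i] up towards the root of the binary min-heap
--     while i > 0:
--         p = (i - 1) // 2
--         if h[i] < h[p]:
--             h[i], h[p] = h[p], h[i]
--             i = p
--         else:
--             break
--
--
-- def _siftdown(h, i):
--     # bubble h[i] down towards the leaves of the binary min-heap
--     n = len(h)
--     while True:
--         l = 2 * i + 1
--         r = l + 1
--         m = i
--         if l < n and h[l] < h[m]:
--             m = l
--         if r < n and h[r] < h[m]:
--             m = r
--         if m == i:
--             break
--         h[i], h[m] = h[m], h[i]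
--         i = m
--
--
-- def solution(k, score):
--     h = []    # binary min-heap holding the current top-k scores; h[0] is the cutoff
--     ans = []
--     for s in score:
--         if len(h) < k:
--             h.append(s)
--             _siftup(h, len(h) - 1)
--         elif s > h[0]:
--             h[0] = s
--             _siftdown(h, 0)
--         ans.append(h[0])
--     return ans
-- ===== Notes on version B (the rewrite author's own statement) =====
-- stated objective: faster
-- what changed: B keeps the current top-k scores in a hand-written binary min-heap (implicit array tree with sift-up/sift-down), so each step costs O(log k) instead of A's O(k) min/max/remove scans plus an O(k log k) sort of the whole hall.
import Mathlib
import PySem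

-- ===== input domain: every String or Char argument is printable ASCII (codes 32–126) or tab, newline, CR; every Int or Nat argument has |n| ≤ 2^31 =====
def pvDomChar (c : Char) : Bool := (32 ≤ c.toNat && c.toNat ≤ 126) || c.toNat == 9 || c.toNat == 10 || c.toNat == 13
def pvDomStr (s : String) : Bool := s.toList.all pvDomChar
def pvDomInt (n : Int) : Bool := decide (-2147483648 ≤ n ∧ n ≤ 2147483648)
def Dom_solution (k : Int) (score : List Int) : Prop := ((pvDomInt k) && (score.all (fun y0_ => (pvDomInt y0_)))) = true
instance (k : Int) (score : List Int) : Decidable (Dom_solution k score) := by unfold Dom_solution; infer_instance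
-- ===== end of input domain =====

-- B replaces A's hall-of-fame list (re-sorted and min/max/remove-scanned at every step, O(k log k)
-- per score) by a hand-written binary min-heap of the top-k scores (O(log k) sift per score).

-- ===== PORT A =====
-- One loop iteration of A: state is (honor, answer).
def solutionStep (k : Int) (st : List Int × List Int) (s : Int) : List Int × List Int :=
  let honor := st.1
  let answer := st.2
  if (honor.length : Int) < k then
    -- honor.append(score[i]); answer.append(min(honor)); honor.sort()
    (PySem.List.sorted (honor ++ [s]) (fun x => x),
     answer ++ [(PySem.List.min? (honor ++ [s]) (fun x => x)).getD 0])
  else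
    match PySem.List.max? honor (fun x => x), PySem.List.min? honor (fun x => x) with
    | some mx, some mn =>
      if mx ≤ s then
        -- honor.append(s); honor.remove(min(honor)); answer.append(min(honor))
        let h1 := honor ++ [s]
        let h2 := match PySem.List.remove? h1 ((PySem.List.min? h1 (fun x => x)).getD 0) with
                  | some h => h
                  | none => h1  -- ValueError; unreachable: min(h1) ∈ h1
        (h2, answer ++ [(PySem.List.min? h2 (fun x => x)).getD 0])
      else if s ≤ mn then
        (honor, answer ++ [mn])
      else if mn ≤ s ∧ s ≤ mx then
        let h1 := honor ++ [s]
        let h2 := match PySem.List.remove? h1 ((PySem.List.min? h1 (fun x => x)).getD 0) with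
                  | some h => h
                  | none => h1  -- ValueError; unreachable
        (h2, answer ++ [(PySem.List.min? h2 (fun x => x)).getD 0])
      else (honor, answer)
    -- Python raises ValueError (max()/min() of empty honor, i.e. k ≤ 0): excluded by Pre_solution
    | _, _ => (honor, answer)

def solution (k : Int) (score : List Int) : List Int :=
  (score.foldl (solutionStep k) ([], [])).2

-- ===== PORT B =====
-- h[i], h[p] = h[p], h[i]  (both indices in range wherever B's code swaps)
def lswap (h : List Int) (i j : Nat) : List Int :=
  (h.set i (h.getD j 0)).set j (h.getD i 0)

-- _siftup's while-loop: recursion on the index i, which moves to the parent (i-1)//2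
def siftUp (h : List Int) (i : Nat) : List Int :=
  if i = 0 then h
  else if h.getD i 0 < h.getD ((i - 1) / 2) 0 then siftUp (lswap h i ((i - 1) / 2)) ((i - 1) / 2)
  else h
termination_by i
decreasing_by omega

-- _siftdown's while-loop: recursion on the index i, which moves to a child (2i+1 or 2i+2)
def siftDown (h : List Int) (i : Nat) : List Int :=
  -- m starts at i, moves to 2i+1 if that child is smaller, then to 2i+2 if smaller still;
  -- if m ≠ i swap and continue, else break (the loop's decision tree, written out)
  if 2 * i + 1 < h.length ∧ h.getD (2 * i + 1) 0 < h.getD i 0 then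
    if 2 * i + 2 < h.length ∧ h.getD (2 * i + 2) 0 < h.getD (2 * i + 1) 0 then
      siftDown (lswap h i (2 * i + 2)) (2 * i + 2)
    else
      siftDown (lswap h i (2 * i + 1)) (2 * i + 1)
  else
    if 2 * i + 2 < h.length ∧ h.getD (2 * i + 2) 0 < h.getD i 0 then
      siftDown (lswap h i (2 * i + 2)) (2 * i + 2)
    else h
termination_by h.length - i
decreasing_by all_goals (simp only [lswap, List.length_set]; omega)

-- One loop iteration of B: state is (h, ans); h is a binary min-heap of the current top-k.
def solutionAltStep (k : Int) (st : List Int × List Int) (s : Int) : List Int × List Int :=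
  let h := st.1
  let h' :=
    if (h.length : Int) < k then siftUp (h ++ [s]) h.length   -- h.append(s); _siftup(h, len(h)-1)
    -- h[0] raises IndexError on empty h, i.e. k ≤ 0: excluded by Pre_solution
    else if h.getD 0 0 < s then siftDown (h.set 0 s) 0        -- h[0] = s; _siftdown(h, 0)
    else h
  (h', st.2 ++ [h'.getD 0 0])                                 -- ans.append(h[0])

def solution_alt (k : Int) (score : List Int) : List Int :=
  (score.foldl (solutionAltStep k) ([], [])).2

-- ===== PRECONDITION & SPEC =====
-- Pre_ excludes exactly the inputs where A raises: k ≤ 0 with a nonempty score list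
-- (max() of the empty honor list raises ValueError on the first iteration).
def Pre_solution (k : Int) (score : List Int) : Prop := score = [] ∨ 1 ≤ k
instance (k : Int) (score : List Int) : Decidable (Pre_solution k score) := by
  unfold Pre_solution; infer_instance

def pvWitness_solution : Int × List Int := (3, [10, 100, 20, 150, 1, 100, 200])

def Spec_solution (k : Int) (score : List Int) (out : List Int) : Prop := out = solution_alt k score
instance (k : Int) (score : List Int) (out : List Int) : Decidable (Spec_solution k score out) := by
  unfold Spec_solution; infer_instance

-- ===== CLAIM (what is proved, stated in full; the proofs are below) =====
def Claim_equal_solution : Prop := ∀ (k : Int) (score : List Int), Dom_solution k score → Pre_solution k score → Spec_solution k score (solution k score)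

-- ===== LEMMAS AND PROOFS =====

-- the binary min-heap property on the array h: every child is ≥ its parent
def IsHeap (h : List Int) : Prop :=
  ∀ c : Nat, 0 < c → c < h.length → h.getD ((c - 1) / 2) 0 ≤ h.getD c 0

-- heap property everywhere except possibly at the edge into node i, plus the
-- grandparent bound on i's children (what _siftup maintains while bubbling up)
def UpInv (h : List Int) (i : Nat) : Prop :=
  (∀ c : Nat, 0 < c → c < h.length → c ≠ i → h.getD ((c - 1) / 2) 0 ≤ h.getD c 0) ∧
  (0 < i → ∀ c : Nat, c < h.length → (c - 1) / 2 = i → h.getD ((i - 1) / 2) 0 ≤ h.getD c 0)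

-- heap property everywhere except possibly at the edges out of node i, plus the
-- grandparent bound on i's children (what _siftdown maintains while bubbling down)
def DownInv (h : List Int) (i : Nat) : Prop :=
  (∀ c : Nat, 0 < c → c < h.length → (c - 1) / 2 ≠ i → h.getD ((c - 1) / 2) 0 ≤ h.getD c 0) ∧
  (0 < i → ∀ c : Nat, c < h.length → (c - 1) / 2 = i → h.getD ((i - 1) / 2) 0 ≤ h.getD c 0)

lemma length_lswap (h : List Int) (i j : Nat) : (lswap h i j).length = h.length := by
  simp [lswap]

lemma getD_set_of_lt (h : List Int) (j m : Nat) (v : Int) (hj : j < h.length) :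
    (h.set j v).getD m 0 = if m = j then v else h.getD m 0 := by
  rw [List.getD_eq_getElem?_getD, List.getElem?_set, List.getD_eq_getElem?_getD]
  by_cases hm : j = m
  · subst hm; simp [hj]
  · simp only [hm, if_false]
    rw [if_neg (fun hx => hm (Eq.symm hx))]

lemma getD_lswap (h : List Int) (i j m : Nat) (hi : i < h.length) (hj : j < h.length) :
    (lswap h i j).getD m 0 =
      if m = j then h.getD i 0 else if m = i then h.getD j 0 else h.getD m 0 := by
  unfold lswap
  rw [getD_set_of_lt _ _ _ _ (by simp [hj]), getD_set_of_lt _ _ _ _ hi]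

lemma perm_lswap (h : List Int) (i j : Nat) (hi : i < h.length) (hj : j < h.length) :
    (lswap h i j).Perm h := by
  unfold lswap
  rw [List.getD_eq_getElem _ _ hi, List.getD_eq_getElem _ _ hj]
  exact List.set_set_perm hi hj

lemma getD_append_of_lt (h t : List Int) (m : Nat) (hm : m < h.length) :
    (h ++ t).getD m 0 = h.getD m 0 := by
  rw [List.getD_eq_getElem?_getD, List.getD_eq_getElem?_getD, List.getElem?_append_left hm]

-- the root of a heap is ≤ every element
lemma root_le_getD (h : List Int) (hs : IsHeap h) :
    ∀ j : Nat, j < h.length → h.getD 0 0 ≤ h.getD j 0 := by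
  intro j
  induction j using Nat.strong_induction_on with
  | _ j ih =>
    intro hj
    by_cases h0 : j = 0
    · subst h0; exact le_refl _
    · exact le_trans (ih ((j - 1) / 2) (by omega) (by omega)) (hs j (by omega) hj)

lemma root_le_mem (h : List Int) (hs : IsHeap h) (y : Int) (hy : y ∈ h) :
    h.getD 0 0 ≤ y := by
  obtain ⟨j, hj, rfl⟩ := List.mem_iff_getElem.mp hy
  rw [← List.getD_eq_getElem h 0 hj]
  exact root_le_getD h hs j hj

lemma siftUp_perm : ∀ (i : Nat) (h : List Int), i < h.length → (siftUp h i).Perm h := by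
  intro i
  induction i using Nat.strong_induction_on with
  | _ i ih =>
    intro h hi
    rw [siftUp]
    split
    · exact List.Perm.refl _
    · next h0 =>
      split
      · next hlt =>
        refine ((ih ((i-1)/2) (by omega) _ (by rw [length_lswap]; omega)).trans
          (perm_lswap h i ((i-1)/2) hi (by omega)))
      · exact List.Perm.refl _

lemma siftUp_heap : ∀ (i : Nat) (h : List Int), i < h.length → UpInv h i → IsHeap (siftUp h i) := by
  intro i
  induction i using Nat.strong_induction_on with
  | _ i ih =>
    intro h hi hinv
    rw [siftUp]
    split
    · next h0 =>
      subst h0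
      intro c hc hclen
      exact hinv.1 c hc hclen (by omega)
    · next h0 =>
      split
      · next hlt =>
        have hp : (i - 1) / 2 < h.length := by omega
        apply ih ((i - 1) / 2) (by omega) _ (by rw [length_lswap]; omega)
        constructor
        · intro c hc hclen hcp
          rw [length_lswap] at hclen
          rw [getD_lswap h i _ _ hi hp, getD_lswap h i _ _ hi hp]
          by_cases hci : c = i
          · subst hci
            rw [if_pos (by omega), if_neg (by omega), if_pos rfl]
            exact le_of_lt hlt
          · by_cases hpc : (c - 1) / 2 = i
            · rw [if_neg (by omega), if_pos hpc, if_neg hcp, if_neg hci]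
              exact hinv.2 (by omega) c hclen hpc
            · by_cases hpp : (c - 1) / 2 = (i - 1) / 2
              · rw [if_pos hpp, if_neg hcp, if_neg hci]
                have h2 := hinv.1 c hc hclen hci
                rw [hpp] at h2
                exact le_trans (le_of_lt hlt) h2
              · rw [if_neg hpp, if_neg hpc, if_neg hcp, if_neg hci]
                exact hinv.1 c hc hclen hci
        · intro hp0 c hclen hpar
          rw [length_lswap] at hclen
          rw [getD_lswap h i _ _ hi hp, getD_lswap h i _ _ hi hp]
          rw [if_neg (by omega : ¬ ((i - 1) / 2 - 1) / 2 = (i - 1) / 2),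
              if_neg (by omega : ¬ ((i - 1) / 2 - 1) / 2 = i)]
          by_cases hci : c = i
          · subst hci
            rw [if_neg (by omega), if_pos rfl]
            exact hinv.1 ((c - 1) / 2) hp0 hp (by omega)
          · rw [if_neg (by omega), if_neg hci]
            have h2 := hinv.1 c (by omega) hclen hci
            rw [hpar] at h2
            exact le_trans (hinv.1 ((i - 1) / 2) hp0 hp (by omega)) h2
      · next hnlt =>
        intro c hc hclen
        by_cases hci : c = i
        · subst hci
          exact not_lt.mp hnlt
        · exact hinv.1 c hc hclen hci

lemma siftDown_perm : ∀ (h : List Int) (i : Nat), i < h.length → (siftDown h i).Perm h := by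
  intro h i
  induction h, i using siftDown.induct with
  | case1 h i hc1 hc2 ih =>
    intro hi
    rw [siftDown, if_pos hc1, if_pos hc2]
    exact (ih (by rw [length_lswap]; exact hc2.1)).trans (perm_lswap h i _ hi hc2.1)
  | case2 h i hc1 hc2 ih =>
    intro hi
    rw [siftDown, if_pos hc1, if_neg hc2]
    exact (ih (by rw [length_lswap]; exact hc1.1)).trans (perm_lswap h i _ hi hc1.1)
  | case3 h i hc1 hc2 ih =>
    intro hi
    rw [siftDown, if_neg hc1, if_pos hc2]
    exact (ih (by rw [length_lswap]; exact hc2.1)).trans (perm_lswap h i _ hi hc2.1)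
  | case4 h i hc1 hc2 =>
    intro hi
    rw [siftDown, if_neg hc1, if_neg hc2]

-- swapping i with its strictly smaller, minimal child m keeps the sift-down invariant
lemma downInv_swap (h : List Int) (i m : Nat) (hi : i < h.length) (hm : m < h.length)
    (hinv : DownInv h i) (hchild : (m - 1) / 2 = i) (him : i < m)
    (hlt : h.getD m 0 < h.getD i 0)
    (hminsib : ∀ c : Nat, 0 < c → c < h.length → (c - 1) / 2 = i → h.getD m 0 ≤ h.getD c 0) :
    DownInv (lswap h i m) m := by
  constructor
  · intro c hc hclen hcpar
    rw [length_lswap] at hclen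
    rw [getD_lswap h i m _ hi hm, getD_lswap h i m _ hi hm]
    by_cases hcm : c = m
    · subst hcm
      rw [if_neg hcpar, if_pos hchild, if_pos rfl]
      exact le_of_lt hlt
    · by_cases hci : c = i
      · subst hci
        rw [if_neg (by omega), if_neg (by omega), if_neg (by omega), if_pos rfl]
        exact hinv.2 hc m hm hchild
      · by_cases hpi : (c - 1) / 2 = i
        · rw [if_neg hcpar, if_pos hpi, if_neg hcm, if_neg hci]
          exact hminsib c hc hclen hpi
        · rw [if_neg hcpar, if_neg hpi, if_neg hcm, if_neg hci]
          exact hinv.1 c hc hclen hpi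
  · intro hm0 c hclen hcpar
    rw [length_lswap] at hclen
    rw [getD_lswap h i m _ hi hm, getD_lswap h i m _ hi hm]
    rw [hchild, if_neg (by omega), if_pos rfl, if_neg (by omega), if_neg (by omega)]
    have h2 := hinv.1 c (by omega) hclen (by omega)
    rw [hcpar] at h2
    exact h2

lemma siftDown_heap : ∀ (h : List Int) (i : Nat), i < h.length → DownInv h i → IsHeap (siftDown h i) := by
  intro h i
  induction h, i using siftDown.induct with
  | case1 h i hc1 hc2 ih =>
    intro hi hinv
    rw [siftDown, if_pos hc1, if_pos hc2]
    refine ih (by rw [length_lswap]; exact hc2.1) ?_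
    refine downInv_swap h i (2 * i + 2) hi hc2.1 hinv (by omega) (by omega)
      (lt_trans hc2.2 hc1.2) ?_
    intro c hc0 hclen hpar
    have hcc : c = 2 * i + 1 ∨ c = 2 * i + 2 := by omega
    rcases hcc with rfl | rfl
    · exact le_of_lt hc2.2
    · exact le_refl _
  | case2 h i hc1 hc2 ih =>
    intro hi hinv
    rw [siftDown, if_pos hc1, if_neg hc2]
    refine ih (by rw [length_lswap]; exact hc1.1) ?_
    refine downInv_swap h i (2 * i + 1) hi hc1.1 hinv (by omega) (by omega) hc1.2 ?_
    intro c hc0 hclen hpar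
    have hcc : c = 2 * i + 1 ∨ c = 2 * i + 2 := by omega
    rcases hcc with rfl | rfl
    · exact le_refl _
    · exact not_lt.mp (fun hlt => hc2 ⟨hclen, hlt⟩)
  | case3 h i hc1 hc2 ih =>
    intro hi hinv
    rw [siftDown, if_neg hc1, if_pos hc2]
    refine ih (by rw [length_lswap]; exact hc2.1) ?_
    refine downInv_swap h i (2 * i + 2) hi hc2.1 hinv (by omega) (by omega) hc2.2 ?_
    intro c hc0 hclen hpar
    have hcc : c = 2 * i + 1 ∨ c = 2 * i + 2 := by omega
    rcases hcc with rfl | rfl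
    · exact le_trans (le_of_lt hc2.2) (not_lt.mp (fun hlt => hc1 ⟨hclen, hlt⟩))
    · exact le_refl _
  | case4 h i hc1 hc2 =>
    intro hi hinv
    rw [siftDown, if_neg hc1, if_neg hc2]
    intro c hc hclen
    by_cases hpi : (c - 1) / 2 = i
    · rw [hpi]
      have hcc : c = 2 * i + 1 ∨ c = 2 * i + 2 := by omega
      rcases hcc with rfl | rfl
      · exact not_lt.mp (fun hlt => hc1 ⟨hclen, hlt⟩)
      · exact not_lt.mp (fun hlt => hc2 ⟨hclen, hlt⟩)
    · exact hinv.1 c hc hclen hpi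

-- appending at the end leaves a valid sift-up start state
lemma upInv_append (h : List Int) (s : Int) (hs : IsHeap h) : UpInv (h ++ [s]) h.length := by
  constructor
  · intro c hc hclen hne
    rw [List.length_append, List.length_singleton] at hclen
    have hcl : c < h.length := by omega
    rw [getD_append_of_lt _ _ _ hcl, getD_append_of_lt _ _ _ (by omega)]
    exact hs c hc hcl
  · intro h0 c hclen hpar
    rw [List.length_append, List.length_singleton] at hclen
    omega

-- overwriting the root leaves a valid sift-down start state
lemma downInv_set (h : List Int) (s : Int) (hs : IsHeap h) : DownInv (h.set 0 s) 0 := by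
  constructor
  · intro c hc hclen hne
    rw [List.length_set] at hclen
    have h0 : 0 < h.length := by omega
    rw [getD_set_of_lt _ _ _ _ h0, getD_set_of_lt _ _ _ _ h0,
        if_neg (by omega : ¬ (c - 1) / 2 = 0), if_neg (by omega : ¬ c = 0)]
    exact hs c hc hclen
  · intro h0; omega

-- min? with the identity key returns the minimum value.
lemma min?_id_eq (l : List Int) (m : Int) (hm : m ∈ l) (hmin : ∀ y ∈ l, m ≤ y) :
    PySem.List.min? l (fun x => x) = some m := by
  cases h : PySem.List.min? l (fun x => x) with
  | none =>
      rw [PySem.List.min?_eq_none_iff] at h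
      subst h; cases hm
  | some v =>
      have hv : v ∈ l := PySem.List.min?_mem h
      have h1 : m ≤ v := hmin v hv
      have h2 : v ≤ m := by simpa using PySem.List.min?_isMin h m hm
      rw [le_antisymm h2 h1]

-- min over any rearrangement of a heap = the heap's root
lemma min_getD_eq_root (l h' : List Int) (hp : l.Perm h') (hs : IsHeap h') (hne : h' ≠ []) :
    (PySem.List.min? l (fun x => x)).getD 0 = h'.getD 0 0 := by
  rw [min?_id_eq l (h'.getD 0 0) (hp.mem_iff.mpr (by
        rw [List.getD_eq_getElem h' 0 (by cases h' <;> simp_all)]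
        exact List.getElem_mem _))
      (fun y hy => root_le_mem h' hs y (hp.subset hy))]
  rfl

-- A's "append s then remove the min" at multiset level: replace the min m by s
lemma erase_min_perm (s m : Int) (hA t : List Int) (hp : hA.Perm (m :: t)) :
    ((hA ++ [s]).erase m).Perm (s :: t) := by
  have h1 : (hA ++ [s]).Perm (m :: (t ++ [s])) := hp.append_right [s]
  have h2 := h1.erase m
  rw [List.erase_cons_head] at h2
  exact h2.trans (List.perm_append_singleton s t)

lemma min?_append_eq (s m : Int) (hA : List Int) (hmem : m ∈ hA)
    (hmin : ∀ y ∈ hA, m ≤ y) (hms : m ≤ s) :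
    PySem.List.min? (hA ++ [s]) (fun x => x) = some m := by
  apply min?_id_eq
  · exact List.mem_append.mpr (Or.inl hmem)
  · intro y hy
    rcases List.mem_append.mp hy with hy | hy
    · exact hmin y hy
    · rw [List.mem_singleton.mp hy]; exact hms

-- one step of A and one step of B preserve: same multiset, B a heap, same answers
lemma step_inv (k : Int) (hk : 1 ≤ k) (s : Int) (hA hB ans : List Int)
    (hp : hA.Perm hB) (hs : IsHeap hB) :
    (solutionStep k (hA, ans) s).1.Perm (solutionAltStep k (hB, ans) s).1 ∧
    IsHeap (solutionAltStep k (hB, ans) s).1 ∧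
    (solutionStep k (hA, ans) s).2 = (solutionAltStep k (hB, ans) s).2 := by
  have hlen : hA.length = hB.length := hp.length_eq
  simp only [solutionStep, solutionAltStep]
  by_cases hlt : (hA.length : Int) < k
  · -- fill phase: the hall is not full yet
    rw [if_pos hlt, if_pos (hlen ▸ hlt)]
    have hiB : hB.length < (hB ++ [s]).length := by simp
    have hupB : IsHeap (siftUp (hB ++ [s]) hB.length) :=
      siftUp_heap hB.length (hB ++ [s]) hiB (upInv_append hB s hs)
    have hpB : (hA ++ [s]).Perm (siftUp (hB ++ [s]) hB.length) :=
      ((hp.append_right [s]).trans (siftUp_perm hB.length (hB ++ [s]) hiB).symm)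
    have hneB : siftUp (hB ++ [s]) hB.length ≠ [] := by
      intro hnil
      have := (siftUp_perm hB.length (hB ++ [s]) hiB).length_eq
      rw [hnil] at this
      simp at this
    refine ⟨(PySem.List.sorted_perm _ _ _).trans hpB, hupB, ?_⟩
    rw [min_getD_eq_root (hA ++ [s]) _ hpB hupB hneB]
  · -- the hall is full (length = k ≥ 1), so hB is nonempty
    rw [if_neg hlt, if_neg (hlen ▸ hlt)]
    obtain ⟨b0, bt, rfl⟩ : ∃ b0 bt, hB = b0 :: bt := by
      cases hB with
      | nil => exfalso; rw [List.length_eq_zero_iff.mpr rfl] at hlen; simp [hlen] at hlt; omega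
      | cons b0 bt => exact ⟨b0, bt, rfl⟩
    have hb0 : (b0 :: bt).getD 0 0 = b0 := rfl
    have hmemA : b0 ∈ hA := hp.mem_iff.mpr List.mem_cons_self
    have hminA : ∀ y ∈ hA, b0 ≤ y := fun y hy => root_le_mem _ hs y (hp.subset hy)
    have hminAeq : PySem.List.min? hA (fun x => x) = some b0 := min?_id_eq hA b0 hmemA hminA
    obtain ⟨mx, hmaxA⟩ : ∃ mx, PySem.List.max? hA (fun x => x) = some mx := by
      cases hmx : PySem.List.max? hA (fun x => x) with
      | none =>
          rw [PySem.List.max?_eq_none_iff] at hmx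
          subst hmx; simp at hlen
      | some mx => exact ⟨mx, rfl⟩
    have hmmx : b0 ≤ mx := by
      simpa using PySem.List.max?_isMax hmaxA b0 hmemA
    rw [hmaxA, hminAeq]
    simp only [hb0]
    -- the common "replace the min by s" case, for b0 < s
    have hrep : b0 < s →
        ((hA ++ [s]).erase b0).Perm (siftDown ((b0 :: bt).set 0 s) 0) ∧
        IsHeap (siftDown ((b0 :: bt).set 0 s) 0) ∧
        (PySem.List.min? ((hA ++ [s]).erase b0) (fun x => x)).getD 0
          = (siftDown ((b0 :: bt).set 0 s) 0).getD 0 0 := by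
      intro hbs
      have h0len : (0 : Nat) < ((b0 :: bt).set 0 s).length := by simp
      have hdperm : (siftDown ((b0 :: bt).set 0 s) 0).Perm (s :: bt) := by
        have := siftDown_perm ((b0 :: bt).set 0 s) 0 h0len
        simpa using this
      have hdheap : IsHeap (siftDown ((b0 :: bt).set 0 s) 0) :=
        siftDown_heap _ 0 h0len (downInv_set (b0 :: bt) s hs)
      have hAperm : ((hA ++ [s]).erase b0).Perm (siftDown ((b0 :: bt).set 0 s) 0) :=
        (erase_min_perm s b0 hA bt hp).trans hdperm.symm
      have hdne : siftDown ((b0 :: bt).set 0 s) 0 ≠ [] := by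
        intro hnil
        have := hdperm.length_eq
        rw [hnil] at this
        simp at this
      exact ⟨hAperm, hdheap, min_getD_eq_root _ _ hAperm hdheap hdne⟩
    by_cases hxs : mx ≤ s
    · rw [if_pos hxs]
      have hbs : b0 ≤ s := le_trans hmmx hxs
      have hremeq : PySem.List.remove? (hA ++ [s])
          ((PySem.List.min? (hA ++ [s]) (fun x => x)).getD 0) = some ((hA ++ [s]).erase b0) := by
        rw [min?_append_eq s b0 hA hmemA hminA hbs]
        exact PySem.List.remove?_eq_some_erase _ _ (List.mem_append.mpr (Or.inl hmemA))
      rw [hremeq]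
      by_cases hblt : b0 < s
      · rw [if_pos hblt]
        obtain ⟨h1, h2, h3⟩ := hrep hblt
        exact ⟨h1, h2, by rw [h3]⟩
      · -- s = b0: A still replaces, but the multiset is unchanged; B keeps the heap
        rw [if_neg hblt]
        have hsb : s = b0 := le_antisymm (not_lt.mp hblt) hbs
        have hAperm : ((hA ++ [s]).erase b0).Perm (b0 :: bt) := by
          have := erase_min_perm s b0 hA bt hp
          rw [hsb] at this ⊢
          exact this
        refine ⟨hAperm, hs, ?_⟩
        rw [min_getD_eq_root _ _ hAperm hs (by simp), hb0]
    · rw [if_neg hxs]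
      by_cases hsm : s ≤ b0
      · -- score[i] <= min(honor): both keep
        rw [if_pos hsm, if_neg (by omega)]
        exact ⟨hp, hs, rfl⟩
      · -- min(honor) < score[i] < max(honor): A's third branch, B replaces
        have hblt : b0 < s := lt_of_not_ge hsm
        rw [if_neg hsm, if_pos ⟨le_of_lt hblt, le_of_lt (lt_of_not_ge hxs)⟩, if_pos hblt]
        have hremeq : PySem.List.remove? (hA ++ [s])
            ((PySem.List.min? (hA ++ [s]) (fun x => x)).getD 0)
            = some ((hA ++ [s]).erase b0) := by
          rw [min?_append_eq s b0 hA hmemA hminA (le_of_lt hblt)]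
          exact PySem.List.remove?_eq_some_erase _ _ (List.mem_append.mpr (Or.inl hmemA))
        rw [hremeq]
        obtain ⟨h1, h2, h3⟩ := hrep hblt
        exact ⟨h1, h2, by rw [h3]⟩

lemma foldl_inv (k : Int) (hk : 1 ≤ k) :
    ∀ (score hA hB ans : List Int), hA.Perm hB → IsHeap hB →
      (score.foldl (solutionStep k) (hA, ans)).2
        = (score.foldl (solutionAltStep k) (hB, ans)).2 := by
  intro score
  induction score with
  | nil => intro hA hB ans _ _; rfl
  | cons s rest ih =>
      intro hA hB ans hp hs
      simp only [List.foldl_cons]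
      obtain ⟨h1, h2, h3⟩ := step_inv k hk s hA hB ans hp hs
      have eA : solutionStep k (hA, ans) s
          = ((solutionStep k (hA, ans) s).1, (solutionAltStep k (hB, ans) s).2) := by
        rw [← h3]
      rw [eA]
      exact ih _ _ _ h1 h2

-- ===== VERDICT (by name: the statement is the Claim_ definition above) =====
theorem solution_spec : Claim_equal_solution := by
  intro k score _ hpre
  unfold Spec_solution solution solution_alt
  rcases hpre with hnil | hk
  · subst hnil; rfl
  · exact foldl_inv k hk score [] [] [] (List.Perm.refl _) (by intro c hc hlen; simp at hlen)
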